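-- pv_equiv track=rewrite | github.com/noemiandras/benford-random-numbers | benfNum.py | count_first_digit
-- ===== SOURCE A (Python) =====
-- def count_first_digit(lst):
--     count = [0, 0, 0, 0, 0, 0, 0, 0, 0, 0]
--     numbers = ['0', '1', '2', '3', '4', '5', '6', '7', '8', '9']
--
--     for n in lst:
--         n_str = str(n)
--         first_digit = int(n_str[0])
--         count[first_digit] += 1
--
--     return numbers, count
-- ===== SOURCE B (Python) =====
-- def count_first_digit(lst):
--     freq = {}
--     for n in lst:
--         while n >= 10:
--             n //= 10
--         freq[n] = freq.get(n, 0) + 1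
--     return [str(d) for d in range(10)], [freq.get(d, 0) for d in range(10)]
-- ===== Notes on version B (the rewrite author's own statement) =====
-- stated objective: alternative
-- what changed: B extracts the leading digit arithmetically by repeated floor division (no str/int round-trip at all) and accumulates a dict histogram, then renders both output lists from range(10); A converts each number to a string, re-parses its first character and increments a preallocated 10-slot list.
import Mathlib
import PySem

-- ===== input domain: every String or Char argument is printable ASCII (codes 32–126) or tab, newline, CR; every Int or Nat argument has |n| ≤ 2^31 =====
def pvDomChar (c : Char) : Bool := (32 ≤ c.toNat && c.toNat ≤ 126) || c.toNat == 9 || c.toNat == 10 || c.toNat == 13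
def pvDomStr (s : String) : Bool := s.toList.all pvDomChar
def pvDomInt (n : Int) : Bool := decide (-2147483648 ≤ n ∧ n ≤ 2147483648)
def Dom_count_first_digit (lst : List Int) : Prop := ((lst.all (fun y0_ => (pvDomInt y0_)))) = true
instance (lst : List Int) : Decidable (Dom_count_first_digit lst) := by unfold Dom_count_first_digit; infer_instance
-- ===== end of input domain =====

-- B computes the leading digit arithmetically (repeated floor division, no string round-trip)
-- and accumulates a dict histogram, instead of A's str/int re-parse into a 10-slot list;
-- alternative algorithm, same cost. Pre_ excludes lists with a negative element (A raises there).


-- A-side helper: int(str(n)[0]) — total form; Pre_ guarantees the inner options are some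
def pvFD (n : Int) : Int :=
  ((PySem.Str.pyGet? (PySem.Int.toStr n) 0).bind (fun c => PySem.Int.ofChars? [c])).getD 0

-- ===== PORT A =====
-- for n in lst: count[int(str(n)[0])] += 1; returns (numbers, count)
def count_first_digit (lst : List Int) : List String × List Int :=
  (["0", "1", "2", "3", "4", "5", "6", "7", "8", "9"],
   lst.foldl (fun count n =>
     PySem.List.pySetD count (pvFD n) (PySem.List.pyGetD count (pvFD n) 0 + 1))
     [0, 0, 0, 0, 0, 0, 0, 0, 0, 0])

-- ===== PORT B =====
-- termination of the while-loop: n // 10 shrinks for n ≥ 10 (cited by pvLead's decreasing_by)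
theorem pv_floordiv_ten_lt (n : Int) (h : 10 ≤ n) : (PySem.Int.floordiv n 10).toNat < n.toNat := by
  rw [PySem.Int.floordiv_eq_ediv_of_pos (by omega)]
  omega

-- while n >= 10: n //= 10
def pvLead (n : Int) : Int :=
  if h10 : 10 ≤ n then pvLead (PySem.Int.floordiv n 10) else n
termination_by n.toNat
decreasing_by exact pv_floordiv_ten_lt n h10

-- freq = {}; for n in lst: (while-loop); freq[n] = freq.get(n, 0) + 1
def pvFreq (lst : List Int) : PySem.Dict Int Int :=
  lst.foldl (fun fr n => fr.insert (pvLead n) (fr.getD (pvLead n) 0 + 1)) PySem.Dict.empty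

-- return [str(d) for d in range(10)], [freq.get(d, 0) for d in range(10)]
def count_first_digit_alt (lst : List Int) : List String × List Int :=
  ((PySem.List.pyRange 0 10 1).map (fun d => PySem.Int.toStr d),
   (PySem.List.pyRange 0 10 1).map (fun d => (pvFreq lst).getD d 0))

-- ===== PRECONDITION & SPEC =====
-- Pre_ excludes exactly the inputs containing a negative element: there str(n)[0] is '-'
-- and Python's int('-') raises ValueError in A.
def Pre_count_first_digit (lst : List Int) : Prop := ∀ n ∈ lst, 0 ≤ n
instance (lst : List Int) : Decidable (Pre_count_first_digit lst) := by unfold Pre_count_first_digit; infer_instance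
def pvWitness_count_first_digit : List Int := [12, 5, 123, 0, 987654321]

def Spec_count_first_digit (lst : List Int) (out : List String × List Int) : Prop := out = count_first_digit_alt lst
instance (lst : List Int) (out : List String × List Int) : Decidable (Spec_count_first_digit lst out) := by unfold Spec_count_first_digit; infer_instance

-- ===== CLAIM (what is proved, stated in full; the proofs are below) =====
def Claim_equal_count_first_digit : Prop := ∀ (lst : List Int), Dom_count_first_digit lst → Pre_count_first_digit lst → Spec_count_first_digit lst (count_first_digit lst)

-- ===== LEMMAS AND PROOFS =====

def pvDigitChars : List Char := ['0', '1', '2', '3', '4', '5', '6', '7', '8', '9']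

theorem pv_digitChar_mem (k : Nat) (h : k < 10) : Nat.digitChar k ∈ pvDigitChars := by
  interval_cases k <;> decide

theorem pv_toDigitsCore_mem (fuel : Nat) : ∀ (n : Nat) (ds : List Char),
    (∀ c ∈ ds, c ∈ pvDigitChars) → ∀ c ∈ Nat.toDigitsCore 10 fuel n ds, c ∈ pvDigitChars := by
  induction fuel with
  | zero => intro n ds hds; simpa [Nat.toDigitsCore] using hds
  | succ f ih =>
    intro n ds hds c hc
    rw [Nat.toDigitsCore] at hc
    by_cases h : n / 10 = 0
    · simp only [h] at hc
      rcases List.mem_cons.mp hc with h1 | h1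
      · exact h1 ▸ pv_digitChar_mem _ (Nat.mod_lt _ (by omega))
      · exact hds _ h1
    · simp only [if_neg h] at hc
      refine ih _ _ ?_ _ hc
      intro c' hc'
      rcases List.mem_cons.mp hc' with h1 | h1
      · exact h1 ▸ pv_digitChar_mem _ (Nat.mod_lt _ (by omega))
      · exact hds _ h1

theorem pv_toDigitsCore_ne_nil (fuel : Nat) : ∀ (n : Nat) (ds : List Char),
    (0 < fuel ∨ ds ≠ []) → Nat.toDigitsCore 10 fuel n ds ≠ [] := by
  induction fuel with
  | zero =>
    intro n ds h
    rcases h with h | h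
    · omega
    · simpa [Nat.toDigitsCore] using h
  | succ f ih =>
    intro n ds _
    rw [Nat.toDigitsCore]
    by_cases h : n / 10 = 0
    · simp [h]
    · simp only [if_neg h]
      exact ih _ _ (Or.inr (by simp))

theorem pv_ofChars_digit (c : Char) (hc : c ∈ pvDigitChars) :
    ∃ d : Int, PySem.Int.ofChars? [c] = some d ∧ 0 ≤ d ∧ d < 10 := by
  fin_cases hc
  · exact ⟨0, by decide, by decide, by decide⟩
  · exact ⟨1, by decide, by decide, by decide⟩
  · exact ⟨2, by decide, by decide, by decide⟩
  · exact ⟨3, by decide, by decide, by decide⟩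
  · exact ⟨4, by decide, by decide, by decide⟩
  · exact ⟨5, by decide, by decide, by decide⟩
  · exact ⟨6, by decide, by decide, by decide⟩
  · exact ⟨7, by decide, by decide, by decide⟩
  · exact ⟨8, by decide, by decide, by decide⟩
  · exact ⟨9, by decide, by decide, by decide⟩

theorem pvFD_eq_digit (n : Int) (hn : 0 ≤ n) :
    ∃ d : Int, pvFD n = d ∧ 0 ≤ d ∧ d < 10 := by
  have hne : Nat.toDigits 10 n.toNat ≠ [] :=
    pv_toDigitsCore_ne_nil _ _ _ (Or.inl (by omega))
  obtain ⟨c, rest, hcr⟩ := List.exists_cons_of_ne_nil hne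
  have hcmem : c ∈ pvDigitChars := by
    refine pv_toDigitsCore_mem (n.toNat + 1) n.toNat [] (by intro c hc; exact absurd hc (List.not_mem_nil)) c ?_
    rw [show Nat.toDigitsCore 10 (n.toNat + 1) n.toNat [] = Nat.toDigits 10 n.toNat from rfl, hcr]
    exact List.mem_cons_self ..
  obtain ⟨d, hd, hd0, hd10⟩ := pv_ofChars_digit c hcmem
  have hchars : PySem.Int.toChars n = c :: rest := by
    rw [PySem.Int.toChars, if_neg (by omega)]
    exact hcr
  refine ⟨d, ?_, hd0, hd10⟩
  simp [pvFD, hchars, hd]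

theorem pvFD_range (n : Int) (hn : 0 ≤ n) : 0 ≤ pvFD n ∧ pvFD n < 10 := by
  obtain ⟨d, hd, h0, h10⟩ := pvFD_eq_digit n hn
  omega

-- toDigitsCore emits the accumulator at the end, independently of it
theorem pv_tdc_append : ∀ (f n : Nat) (ds : List Char),
    Nat.toDigitsCore 10 f n ds = Nat.toDigitsCore 10 f n [] ++ ds := by
  intro f
  induction f with
  | zero => intro n ds; simp [Nat.toDigitsCore]
  | succ f ih =>
    intro n ds
    rw [Nat.toDigitsCore, Nat.toDigitsCore]
    by_cases h : n / 10 = 0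
    · simp [h]
    · simp only [if_neg h]
      rw [ih (n / 10) (Nat.digitChar (n % 10) :: ds), ih (n / 10) [Nat.digitChar (n % 10)]]
      simp

-- fuel irrelevance above n
theorem pv_tdc_fuel : ∀ (f f' n : Nat) (ds : List Char), n < f → n < f' →
    Nat.toDigitsCore 10 f n ds = Nat.toDigitsCore 10 f' n ds := by
  intro f
  induction f with
  | zero => intro f' n ds h; omega
  | succ f ih =>
    intro f' n ds h h'
    cases f' with
    | zero => omega
    | succ f' =>
      rw [Nat.toDigitsCore, Nat.toDigitsCore]
      by_cases hd : n / 10 = 0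
      · simp [hd]
      · simp only [if_neg hd]
        have hn10 : n / 10 < n := Nat.div_lt_self (by omega) (by omega)
        exact ih f' (n / 10) _ (by omega) (by omega)

theorem pv_toDigits_step (m : Nat) (h : 10 ≤ m) :
    Nat.toDigits 10 m = Nat.toDigits 10 (m / 10) ++ [Nat.digitChar (m % 10)] := by
  have h1 : ¬ (m / 10 = 0) := by omega
  show Nat.toDigitsCore 10 (m + 1) m [] = _
  rw [Nat.toDigitsCore]
  simp only [if_neg h1]
  rw [pv_tdc_fuel m (m / 10 + 1) (m / 10) [Nat.digitChar (m % 10)]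
      (Nat.div_lt_self (by omega) (by omega)) (by omega)]
  rw [pv_tdc_append (m / 10 + 1) (m / 10) [Nat.digitChar (m % 10)]]
  rfl

theorem pvFD_head (n : Int) (hn : 0 ≤ n) (c : Char) (rest : List Char)
    (hcr : Nat.toDigits 10 n.toNat = c :: rest) :
    pvFD n = (PySem.Int.ofChars? [c]).getD 0 := by
  have hchars : PySem.Int.toChars n = c :: rest := by
    rw [PySem.Int.toChars, if_neg (by omega)]
    exact hcr
  simp [pvFD, hchars]

theorem pvFD_step (n : Int) (h : 10 ≤ n) : pvFD n = pvFD (PySem.Int.floordiv n 10) := by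
  have hfd : PySem.Int.floordiv n 10 = ((n.toNat / 10 : Nat) : Int) := by
    rw [PySem.Int.floordiv_eq_ediv_of_pos (by omega)]
    omega
  have hne : Nat.toDigits 10 (n.toNat / 10) ≠ [] :=
    pv_toDigitsCore_ne_nil _ _ _ (Or.inl (by omega))
  obtain ⟨c, rest, hcr0⟩ := List.exists_cons_of_ne_nil hne
  have hcr : Nat.toDigits 10 (n.toNat / 10) = c :: rest := hcr0
  have hstep := pv_toDigits_step n.toNat (by omega)
  rw [hcr] at hstep
  have h1 := pvFD_head n (by omega) c (rest ++ [Nat.digitChar (n.toNat % 10)])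
    (by rw [hstep]; rfl)
  have h2 : pvFD (PySem.Int.floordiv n 10) = (PySem.Int.ofChars? [c]).getD 0 := by
    rw [hfd]
    refine pvFD_head _ (by omega) c rest ?_
    rw [Int.toNat_natCast]
    exact hcr
  rw [h1, h2]

theorem pvFD_base (n : Int) (h0 : 0 ≤ n) (h10 : n < 10) : pvFD n = n := by
  interval_cases n <;> decide

theorem pvLead_eq_pvFD_aux : ∀ (m : Nat) (n : Int), 0 ≤ n → n.toNat ≤ m → pvLead n = pvFD n := by
  intro m
  induction m with
  | zero =>
    intro n h0 hm
    have hn : n = 0 := by omega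
    subst hn
    rw [pvLead]
    norm_num
    exact (pvFD_base 0 (by omega) (by omega)).symm
  | succ m ih =>
    intro n h0 hm
    rw [pvLead]
    by_cases h : 10 ≤ n
    · rw [dif_pos h,
        ih (PySem.Int.floordiv n 10)
          (by rw [PySem.Int.floordiv_eq_ediv_of_pos (by omega)]; omega)
          (by have := pv_floordiv_ten_lt n h; omega),
        ← pvFD_step n h]
    · rw [dif_neg h]
      exact (pvFD_base n h0 (by omega)).symm

theorem pvLead_eq_pvFD (n : Int) (hn : 0 ≤ n) : pvLead n = pvFD n :=
  pvLead_eq_pvFD_aux n.toNat n hn (le_refl _)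

def pvStep (count : List Int) (n : Int) : List Int :=
  PySem.List.pySetD count (pvFD n) (PySem.List.pyGetD count (pvFD n) 0 + 1)

theorem pv_length_step (count : List Int) (n : Int) : (pvStep count n).length = count.length := by
  simp [pvStep, PySem.List.length_pySetD]

theorem pv_length_fold (lst : List Int) : ∀ (acc : List Int),
    (lst.foldl pvStep acc).length = acc.length := by
  induction lst with
  | nil => intro acc; rfl
  | cons x xs ih => intro acc; rw [List.foldl_cons, ih, pv_length_step]

theorem pv_fold_getD (lst : List Int) (acc : List Int) (hlen : acc.length = 10)
    (hpos : ∀ n ∈ lst, 0 ≤ n) (d : Nat) :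
    PySem.List.pyGetD (lst.foldl pvStep acc) (d : Int) 0 =
      PySem.List.pyGetD acc (d : Int) 0 + ((lst.map pvFD).count (d : Int) : Int) := by
  induction lst generalizing acc with
  | nil => simp
  | cons x xs ih =>
    have hx := pvFD_range x (hpos x (List.mem_cons_self ..))
    have hstep : (pvStep acc x).length = 10 := by rw [pv_length_step]; exact hlen
    have hcnt : ((x :: xs).map pvFD).count (d : Int) =
        (if pvFD x = (d : Int) then 1 else 0) + (xs.map pvFD).count (d : Int) := by
      simp [List.count_cons]
      by_cases h : pvFD x = (d : Int) <;> simp [h] <;> omega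
    rw [List.foldl_cons, ih _ hstep (fun n hn => hpos n (List.mem_cons_of_mem _ hn))]
    have hfx : pvFD x = ((pvFD x).toNat : Int) := by omega
    have hset : PySem.List.pyGetD (pvStep acc x) (d : Int) 0 =
        if d = (pvFD x).toNat then PySem.List.pyGetD acc (((pvFD x).toNat : Int)) 0 + 1
        else PySem.List.pyGetD acc (d : Int) 0 := by
      rw [pvStep, hfx]
      exact PySem.List.pyGetD_pySetD_natCast acc _ _ _ _ (by omega)
    rw [hset, hcnt]
    by_cases hNat : d = (pvFD x).toNat
    · have h : pvFD x = (d : Int) := by omega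
      rw [if_pos hNat, if_pos h, hNat]
      push_cast
      ring
    · have h : ¬ (pvFD x = (d : Int)) := by omega
      rw [if_neg hNat, if_neg h]
      push_cast
      ring

theorem pv_freq_getD (lst : List Int) (k : Int) :
    (pvFreq lst).getD k 0 = ((lst.map pvLead).count k : Int) := by
  have hmap : List.foldl
      (fun (fr : PySem.Dict Int Int) (x : Int) => fr.insert x (fr.getD x 0 + 1))
      PySem.Dict.empty (lst.map pvLead)
      = List.foldl (fun fr n => fr.insert (pvLead n) (fr.getD (pvLead n) 0 + 1))
        PySem.Dict.empty lst := List.foldl_map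
  rw [pvFreq, ← hmap, PySem.Dict.getD_foldl_insert_add_one, PySem.Dict.getD_empty]
  ring

theorem pv_map_lead_eq_map_fd (lst : List Int) (hpos : ∀ n ∈ lst, 0 ≤ n) :
    lst.map pvLead = lst.map pvFD :=
  List.map_congr_left (fun n hn => pvLead_eq_pvFD n (hpos n hn))

-- ===== VERDICT (by name: the statement is the Claim_ definition above) =====
theorem count_first_digit_spec : Claim_equal_count_first_digit := by
  intro lst _ hpre
  unfold Spec_count_first_digit count_first_digit count_first_digit_alt
  have hr : PySem.List.pyRange 0 10 1 = [0,1,2,3,4,5,6,7,8,9] := by decide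
  rw [hr]
  refine Prod.ext ?_ ?_
  · show (["0","1","2","3","4","5","6","7","8","9"] : List String) =
      List.map (fun d => PySem.Int.toStr d) [0,1,2,3,4,5,6,7,8,9]
    decide
  show lst.foldl pvStep [0,0,0,0,0,0,0,0,0,0] =
    List.map (fun d => (pvFreq lst).getD d 0) [0,1,2,3,4,5,6,7,8,9]
  have hB : ∀ k : Int, (pvFreq lst).getD k 0 = ((lst.map pvFD).count k : Int) := by
    intro k
    rw [pv_freq_getD, pv_map_lead_eq_map_fd lst hpre]
  apply List.ext_getElem
  · rw [pv_length_fold]; simp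
  · intro d hd1 hd2
    have hd : d < 10 := by rw [pv_length_fold] at hd1; simpa using hd1
    have hL : (lst.foldl pvStep [0,0,0,0,0,0,0,0,0,0])[d]'hd1 =
        PySem.List.pyGetD (lst.foldl pvStep [0,0,0,0,0,0,0,0,0,0]) (d : Int) 0 := by
      rw [PySem.List.pyGetD_natCast, List.getD_eq_getElem _ _ hd1]
    have hz : PySem.List.pyGetD ([0,0,0,0,0,0,0,0,0,0] : List Int) (d : Int) 0 = 0 := by
      rw [PySem.List.pyGetD_natCast]
      interval_cases d <;> rfl
    rw [hL, pv_fold_getD lst _ (by simp) hpre d, hz, zero_add]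
    interval_cases d <;> simp [hB]
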